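-- pv_equiv track=rewrite | github.com/X-Augenstern/EAViz | utils/edf.py | map_channels
-- ===== SOURCE A (Python) =====
-- from typing import List
--
-- def map_channels(selected_channels: List, raw_channels: List):
--     """
--     将raw中的通道映射为统一的通道名
--     :param selected_channels: 用户选择的目标通道
--     :param raw_channels: EDF文件中实际的通道
--     :return: 更新后的 selected_channels, 匹配的 mapping_list
--     """
--     # 获得selected_channels在raw_edf上的映射：mapping_list（目标：数量相等，名字对应）
--     tmp_channels = selected_channels.copy()
--     mapping_list = []
--     for key in tmp_channels:
--         tmp = []
--         for ch_name in raw_channels: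
--             if key in ch_name:
--                 tmp.append(ch_name)
--         if len(tmp) == 0:  # 选择 > 存在
--             selected_channels.remove(key)
--         elif len(tmp) == 1:  # 选择 = 存在
--             mapping_list.extend(tmp)
--         else:  # 选择 < 存在：存在相近的通道名，则只保留最短的
--             tmp = [ch_name for ch_name in tmp if len(ch_name) == min(len(ch) for ch in tmp)]
--             if len(tmp) == 1:
--                 mapping_list.extend(tmp)
--             else:  # 存在两条名字相同的通道：直接报异常
--                 mapping_list = []
--                 break
--     return selected_channels, mapping_list
-- ===== SOURCE B (Python) =====
-- from typing import List
--
-- def map_channels(selected_channels: List, raw_channels: List):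
--     mapping_list = []
--     for key in list(selected_channels):
--         best = None
--         tie = False
--         for ch_name in raw_channels:
--             if key in ch_name:
--                 if best is None or len(ch_name) < len(best):
--                     best = ch_name
--                     tie = False
--                 elif len(ch_name) == len(best):
--                     tie = True
--         if best is None:
--             selected_channels.remove(key)
--         elif tie:
--             mapping_list = []
--             break
--         else:
--             mapping_list.append(best)
--     return selected_channels, mapping_list
-- ===== Notes on version B (the rewrite author's own statement) =====
-- stated objective: faster
-- what changed: Replaces the collect-all-matches list, min() pass and re-filter with a single pass per key that keeps only a running shortest match plus a tie flag (reset on a strictly shorter match); A additionally re-evaluates min(len(ch) for ch in tmp) for every element of its filtering comprehension, which B's running minimum removes.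
import Mathlib
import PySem

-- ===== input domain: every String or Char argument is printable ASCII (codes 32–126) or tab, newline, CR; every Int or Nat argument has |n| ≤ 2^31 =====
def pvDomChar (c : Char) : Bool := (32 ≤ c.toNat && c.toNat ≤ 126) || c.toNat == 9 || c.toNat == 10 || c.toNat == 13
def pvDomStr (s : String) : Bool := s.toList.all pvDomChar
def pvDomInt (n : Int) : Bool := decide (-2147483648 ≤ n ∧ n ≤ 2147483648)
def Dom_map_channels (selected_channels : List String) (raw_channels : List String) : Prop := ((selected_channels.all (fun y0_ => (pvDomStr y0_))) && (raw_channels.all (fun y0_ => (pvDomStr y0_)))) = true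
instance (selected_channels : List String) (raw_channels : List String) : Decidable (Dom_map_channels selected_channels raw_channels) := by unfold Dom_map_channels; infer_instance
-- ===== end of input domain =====

-- B replaces A's collect-matches/min/re-filter passes per key by a single pass keeping a running
-- shortest match and a tie flag (measured faster: A re-runs min() per comprehension element). Equivalence is about the RETURN value;
-- both Pythons mutate selected_channels identically (list.remove on a key taken from a copy, so the
-- key is always present and remove never raises; ported as the total remove?/getD form).

-- ===== PORT A =====
-- the for-loop over tmp_channels, threading (selected_channels, mapping_list); returning means 'break'
def pvGoA (raw : List String) : List String → List String → List String → List String × List String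
  | [], sel, mapping => (sel, mapping)
  | key :: rest, sel, mapping =>
    let tmp := raw.filter (fun ch => PySem.Str.isIn key ch)
    if tmp.length = 0 then
      pvGoA raw rest ((PySem.List.remove? sel key).getD sel) mapping
    else if tmp.length = 1 then
      pvGoA raw rest sel (mapping ++ tmp)
    else
      let m := (PySem.List.min? (tmp.map (fun ch => PySem.Str.len ch)) (fun x => x)).getD 0
      let tmp2 := tmp.filter (fun ch => PySem.Str.len ch == m)
      if tmp2.length = 1 then pvGoA raw rest sel (mapping ++ tmp2)
      else (sel, [])

def map_channels (selected_channels : List String) (raw_channels : List String) : List String × List String :=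
  pvGoA raw_channels selected_channels selected_channels []

-- ===== PORT B =====
-- inner-loop body of B: running (best, tie) state over raw_channels
def pvStepB (key : String) (st : Option String × Bool) (ch : String) : Option String × Bool :=
  if PySem.Str.isIn key ch then
    match st.1 with
    | none => (some ch, false)
    | some b =>
      if PySem.Str.len ch < PySem.Str.len b then (some ch, false)
      else if PySem.Str.len ch = PySem.Str.len b then (st.1, true)
      else st
  else st

def pvGoB (raw : List String) : List String → List String → List String → List String × List String
  | [], sel, mapping => (sel, mapping)
  | key :: rest, sel, mapping =>
    match raw.foldl (pvStepB key) (none, false) with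
    | (none, _) => pvGoB raw rest ((PySem.List.remove? sel key).getD sel) mapping
    | (some b, tie) => if tie then (sel, []) else pvGoB raw rest sel (mapping ++ [b])

def map_channels_alt (selected_channels : List String) (raw_channels : List String) : List String × List String :=
  pvGoB raw_channels selected_channels selected_channels []

-- ===== PRECONDITION & SPEC =====
def Spec_map_channels (selected_channels : List String) (raw_channels : List String) (out : List String × List String) : Prop := out = map_channels_alt selected_channels raw_channels
instance (selected_channels : List String) (raw_channels : List String) (out : List String × List String) : Decidable (Spec_map_channels selected_channels raw_channels out) := by unfold Spec_map_channels; infer_instance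

-- ===== CLAIM (what is proved, stated in full; the proofs are below) =====
def Claim_equal_map_channels : Prop := ∀ (selected_channels : List String) (raw_channels : List String), Dom_map_channels selected_channels raw_channels → Spec_map_channels selected_channels raw_channels (map_channels selected_channels raw_channels)

-- ===== LEMMAS AND PROOFS =====

-- minimum of the lengths of a nonempty list (0 for [])
def pvMlen : List String → Int
  | [] => 0
  | x :: t => t.foldl (fun a ch => min a (PySem.Str.len ch)) (PySem.Str.len x)

-- the unconditional body of pvStepB (applied only to matching channels)
def pvStepB' (st : Option String × Bool) (ch : String) : Option String × Bool :=
  match st.1 with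
  | none => (some ch, false)
  | some b =>
    if PySem.Str.len ch < PySem.Str.len b then (some ch, false)
    else if PySem.Str.len ch = PySem.Str.len b then (st.1, true)
    else st

theorem pvFoldl_stepB_eq (key : String) (raw : List String) (st : Option String × Bool) :
    raw.foldl (pvStepB key) st = (raw.filter (fun ch => PySem.Str.isIn key ch)).foldl pvStepB' st := by
  induction raw generalizing st with
  | nil => rfl
  | cons ch t ih =>
    by_cases h : PySem.Str.isIn key ch
    · have h' : PySem.Chars.isIn key.toList ch.toList = true := by simpa using h
      have hstep : pvStepB key st ch = pvStepB' st ch := by simp [pvStepB, pvStepB', h']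
      rw [List.foldl_cons, List.filter_cons, if_pos h, hstep, List.foldl_cons]
      exact ih _
    · simp only [Bool.not_eq_true] at h
      have h' : PySem.Chars.isIn key.toList ch.toList = false := by simpa using h
      have hstep : pvStepB key st ch = st := by simp [pvStepB, h']
      rw [List.foldl_cons, List.filter_cons, if_neg (by simpa using h), hstep]
      exact ih _

theorem pvLe_foldl_min (l : List String) (a : Int) :
    l.foldl (fun a ch => min a (PySem.Str.len ch)) a ≤ a ∧
    ∀ y ∈ l, l.foldl (fun a ch => min a (PySem.Str.len ch)) a ≤ PySem.Str.len y := by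
  induction l generalizing a with
  | nil => simp
  | cons x t ih =>
    refine ⟨le_trans (ih (min a (PySem.Str.len x))).1 (by omega), ?_⟩
    intro y hy
    rcases List.mem_cons.mp hy with hy | hy
    · rw [hy]
      exact le_trans (ih (min a (PySem.Str.len x))).1 (by omega)
    · exact (ih (min a (PySem.Str.len x))).2 y hy

theorem pvFoldl_min_mem (l : List String) (a : Int) :
    l.foldl (fun a ch => min a (PySem.Str.len ch)) a = a ∨
    ∃ y ∈ l, l.foldl (fun a ch => min a (PySem.Str.len ch)) a = PySem.Str.len y := by
  induction l generalizing a with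
  | nil => simp
  | cons x t ih =>
    rcases ih (min a (PySem.Str.len x)) with h | ⟨y, hy, hey⟩
    · simp only [List.foldl_cons, h]
      rcases le_total a (PySem.Str.len x) with hle | hle
      · left; omega
      · right; exact ⟨x, by simp, by omega⟩
    · right; exact ⟨y, by simp [hy], by simpa using hey⟩

theorem pvMlen_le (x : String) (t : List String) :
    ∀ y ∈ x :: t, pvMlen (x :: t) ≤ PySem.Str.len y := by
  intro y hy
  rcases List.mem_cons.mp hy with hy | hy
  · rw [hy]
    simpa [pvMlen] using (pvLe_foldl_min t (PySem.Str.len x)).1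
  · simpa [pvMlen] using (pvLe_foldl_min t (PySem.Str.len x)).2 y hy

theorem pvMlen_attained (x : String) (t : List String) :
    ∃ y ∈ x :: t, PySem.Str.len y = pvMlen (x :: t) := by
  rcases pvFoldl_min_mem t (PySem.Str.len x) with h | ⟨y, hy, hey⟩
  · exact ⟨x, by simp, by simp only [pvMlen]; exact h.symm⟩
  · exact ⟨y, by simp [hy], by simp only [pvMlen]; exact hey.symm⟩

theorem pvMlen_append_singleton (x : String) (t : List String) (ch : String) :
    pvMlen ((x :: t) ++ [ch]) = min (pvMlen (x :: t)) (PySem.Str.len ch) := by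
  simp [pvMlen, List.foldl_append]

-- A's computed minimum equals pvMlen on a nonempty list
theorem pvMinQ_eq (x : String) (t : List String) :
    (PySem.List.min? ((x :: t).map (fun ch => PySem.Str.len ch)) (fun x => x)).getD 0
      = pvMlen (x :: t) := by
  simp [PySem.List.min?_id_cons, List.foldl_map, pvMlen]

-- nonempty filter at the minimum
theorem pvFilterMin_ne_nil (x : String) (t : List String) :
    (x :: t).filter (fun ch => PySem.Str.len ch == pvMlen (x :: t)) ≠ [] := by
  rcases pvMlen_attained x t with ⟨y, hy, hey⟩
  intro hnil
  have hmem : y ∈ (x :: t).filter (fun ch => PySem.Str.len ch == pvMlen (x :: t)) :=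
    List.mem_filter.mpr ⟨hy, by simpa using hey⟩
  rw [hnil] at hmem
  simp at hmem

-- characterization of B's running fold in terms of A's filtered list
theorem pvFold_char (tmp : List String) :
    (tmp.foldl pvStepB' (none, false)).1
        = (tmp.filter (fun ch => PySem.Str.len ch == pvMlen tmp)).head? ∧
    (tmp.foldl pvStepB' (none, false)).2
        = decide (2 ≤ (tmp.filter (fun ch => PySem.Str.len ch == pvMlen tmp)).length) := by
  induction tmp using List.reverseRecOn with
  | nil => simp
  | append_singleton tmp ch ih =>
    match tmp with
    | [] => simp [pvStepB', pvMlen]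
    | x :: t =>
      obtain ⟨ih1, ih2⟩ := ih
      have hne := pvFilterMin_ne_nil x t
      obtain ⟨b, t2, ht2⟩ : ∃ b t2,
          (x :: t).filter (fun c => PySem.Str.len c == pvMlen (x :: t)) = b :: t2 := by
        cases h : (x :: t).filter (fun c => PySem.Str.len c == pvMlen (x :: t)) with
        | nil => exact absurd h hne
        | cons b t2 => exact ⟨b, t2, rfl⟩
      have hb : PySem.Str.len b = pvMlen (x :: t) := by
        have hmem : b ∈ (x :: t).filter (fun c => PySem.Str.len c == pvMlen (x :: t)) := by
          rw [ht2]; exact List.mem_cons_self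
        have := (List.mem_filter.mp hmem).2
        simpa using this
      have hlb : ∀ y ∈ x :: t, pvMlen (x :: t) ≤ PySem.Str.len y := pvMlen_le x t
      have hPair : List.foldl pvStepB' (none, false) (x :: t)
          = (some b, decide (2 ≤ ((x :: t).filter (fun c => PySem.Str.len c == pvMlen (x :: t))).length)) := by
        rw [Prod.ext_iff]
        exact ⟨by rw [ih1, ht2]; rfl, ih2⟩
      rw [List.foldl_append, hPair, List.foldl_cons, List.foldl_nil]
      rcases lt_trichotomy (PySem.Str.len ch) (pvMlen (x :: t)) with hlt | heq | hgt
      · -- strictly shorter: ch is the new unique minimum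
        have hstep : pvStepB' (some b, decide (2 ≤ ((x :: t).filter (fun c => PySem.Str.len c == pvMlen (x :: t))).length)) ch
            = (some ch, false) := by
          simp only [pvStepB']
          rw [if_pos (show PySem.Str.len ch < PySem.Str.len b by rw [hb]; exact hlt)]
        have h1 : (x :: t).filter (fun c => PySem.Str.len c == PySem.Str.len ch) = [] := by
          rw [List.filter_eq_nil_iff]
          intro y hy
          have := hlb y hy
          simp only [beq_iff_eq]
          intro hcc
          omega
        have hfilt : ((x :: t) ++ [ch]).filter
            (fun c => PySem.Str.len c == pvMlen ((x :: t) ++ [ch])) = [ch] := by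
          have hch : List.filter (fun c => PySem.Str.len c == PySem.Str.len ch) [ch] = [ch] := by
            rw [List.filter_cons, if_pos (show (PySem.Str.len ch == PySem.Str.len ch) = true by simp),
              List.filter_nil]
          rw [List.filter_append, pvMlen_append_singleton,
            (show min (pvMlen (x :: t)) (PySem.Str.len ch) = PySem.Str.len ch by omega),
            h1, List.nil_append, hch]
        rw [hstep, hfilt]
        exact ⟨rfl, rfl⟩
      · -- equal minimum length: a tie
        have hstep : pvStepB' (some b, decide (2 ≤ ((x :: t).filter (fun c => PySem.Str.len c == pvMlen (x :: t))).length)) ch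
            = (some b, true) := by
          simp only [pvStepB']
          rw [if_neg (show ¬ PySem.Str.len ch < PySem.Str.len b by rw [hb]; omega),
            if_pos (show PySem.Str.len ch = PySem.Str.len b by rw [hb]; omega)]
        have hfilt : ((x :: t) ++ [ch]).filter
            (fun c => PySem.Str.len c == pvMlen ((x :: t) ++ [ch]))
            = ((x :: t).filter (fun c => PySem.Str.len c == pvMlen (x :: t))) ++ [ch] := by
          have hch : List.filter (fun c => PySem.Str.len c == pvMlen (x :: t)) [ch] = [ch] := by
            rw [List.filter_cons, if_pos (show (PySem.Str.len ch == pvMlen (x :: t)) = true by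
              simp only [beq_iff_eq]; exact heq), List.filter_nil]
          rw [List.filter_append, pvMlen_append_singleton,
            (show min (pvMlen (x :: t)) (PySem.Str.len ch) = pvMlen (x :: t) by omega), hch]
        rw [hstep, hfilt, ht2, List.cons_append]
        refine ⟨rfl, ?_⟩
        simp only [List.length_cons, List.length_append]
        symm
        rw [decide_eq_true_eq]
        omega
      · -- strictly longer: state and filtered list unchanged
        have hstep : pvStepB' (some b, decide (2 ≤ ((x :: t).filter (fun c => PySem.Str.len c == pvMlen (x :: t))).length)) ch
            = (some b, decide (2 ≤ ((x :: t).filter (fun c => PySem.Str.len c == pvMlen (x :: t))).length)) := by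
          simp only [pvStepB']
          rw [if_neg (show ¬ PySem.Str.len ch < PySem.Str.len b by rw [hb]; omega),
            if_neg (show ¬ PySem.Str.len ch = PySem.Str.len b by rw [hb]; omega)]
        have hfilt : ((x :: t) ++ [ch]).filter
            (fun c => PySem.Str.len c == pvMlen ((x :: t) ++ [ch]))
            = (x :: t).filter (fun c => PySem.Str.len c == pvMlen (x :: t)) := by
          have hch : List.filter (fun c => PySem.Str.len c == pvMlen (x :: t)) [ch] = [] := by
            rw [List.filter_cons, if_neg (show ¬ (PySem.Str.len ch == pvMlen (x :: t)) = true by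
              simp only [beq_iff_eq]; omega), List.filter_nil]
          rw [List.filter_append, pvMlen_append_singleton,
            (show min (pvMlen (x :: t)) (PySem.Str.len ch) = pvMlen (x :: t) by omega), hch,
            List.append_nil]
        rw [hstep, hfilt, ht2]
        exact ⟨rfl, rfl⟩

theorem pvGo_eq (raw : List String) (keys sel mapping : List String) :
    pvGoA raw keys sel mapping = pvGoB raw keys sel mapping := by
  induction keys generalizing sel mapping with
  | nil => rfl
  | cons key rest ih =>
    rw [pvGoA, pvGoB, pvFoldl_stepB_eq]
    cases htmp : raw.filter (fun ch => PySem.Str.isIn key ch) with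
    | nil =>
      simp only [List.length_nil, List.foldl_nil]
      rw [if_pos trivial]
      exact ih _ _
    | cons x t =>
      simp only []
      obtain ⟨ih1, ih2⟩ := pvFold_char (x :: t)
      have hne := pvFilterMin_ne_nil x t
      obtain ⟨b, t2, ht2⟩ : ∃ b t2,
          (x :: t).filter (fun c => PySem.Str.len c == pvMlen (x :: t)) = b :: t2 := by
        cases h : (x :: t).filter (fun c => PySem.Str.len c == pvMlen (x :: t)) with
        | nil => exact absurd h hne
        | cons b t2 => exact ⟨b, t2, rfl⟩
      have hPair : List.foldl pvStepB' (none, false) (x :: t)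
          = (some b, decide (2 ≤ ((x :: t).filter (fun c => PySem.Str.len c == pvMlen (x :: t))).length)) := by
        rw [Prod.ext_iff]
        exact ⟨by rw [ih1, ht2]; rfl, ih2⟩
      rw [hPair]
      show _ = if decide (2 ≤ ((x :: t).filter (fun c => PySem.Str.len c == pvMlen (x :: t))).length) = true
               then (sel, ([] : List String)) else pvGoB raw rest sel (mapping ++ [b])
      rw [if_neg (show ¬ (x :: t).length = 0 by simp)]
      by_cases hone : (x :: t).length = 1
      · -- exactly one match: tmp = [x] and the filtered list is [x]
        have ht0 : t = [] := by simpa using hone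
        subst ht0
        have hx : (x :: ([] : List String)).filter (fun c => PySem.Str.len c == pvMlen [x]) = [x] := by
          rw [List.filter_cons, if_pos (show (PySem.Str.len x == pvMlen [x]) = true by
            simp only [beq_iff_eq, pvMlen, List.foldl_nil]), List.filter_nil]
        rw [hx] at ht2
        injection ht2 with hbx ht20
        subst hbx; subst ht20
        rw [if_pos hone, hx]
        rw [if_neg (show ¬ decide (2 ≤ ([x] : List String).length) = true by simp)]
        exact ih _ _
      · -- several matches: A filters at the minimum length
        rw [if_neg hone, pvMinQ_eq, ht2]
        by_cases h2 : t2 = []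
        · subst h2
          rw [if_pos (by rfl : ([b] : List String).length = 1)]
          rw [if_neg (show ¬ decide (2 ≤ ([b] : List String).length) = true by simp)]
          exact ih _ _
        · have hlen2 : 2 ≤ (b :: t2).length := by
            cases t2 with
            | nil => exact absurd rfl h2
            | cons u v => simp
          rw [if_neg (show ¬ (b :: t2).length = 1 by omega)]
          rw [if_pos (show decide (2 ≤ (b :: t2).length) = true by simpa using hlen2)]

-- ===== VERDICT (by name: the statement is the Claim_ definition above) =====
theorem map_channels_spec : Claim_equal_map_channels := by
  intro sel raw _
  unfold Spec_map_channels map_channels map_channels_alt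
  exact pvGo_eq raw sel sel []
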